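-- pv_equiv track=rewrite | github.com/fezanola/pdf-paragraph-extractor | pdf_scraper.py | search_in_text
-- ===== SOURCE A (Python) =====
-- def search_in_text(text, search_terms):
--     results = {}
--     lines = text.split('\n')
--     for line in lines:
--         for term in search_terms:
--             if term.lower() in line.lower():
--                 if term in results:
--                     results[term].append(line.strip())
--                 else:
--                     results[term] = [line.strip()]
--     return results
-- ===== SOURCE B (Python) =====
-- def search_in_text(text, search_terms):
--     """Group the matching lines per term, listing terms in the order they first appear in the text."""
--     lines = text.split('\n')
--     groups = []
--     for term in search_terms:
--         tl = term.lower()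
--         matches = [(i, line.strip()) for i, line in enumerate(lines) if tl in line.lower()]
--         if matches:
--             groups.append((matches[0][0], term, [s for _, s in matches]))
--     groups.sort(key=lambda g: g[0])
--     return {term: found for _, term, found in groups}
-- ===== Notes on version B (the rewrite author's own statement) =====
-- stated objective: alternative
-- what changed: B is term-outer instead of A's line-outer dict-mutating double loop: it collects each term's matching lines in one comprehension, then presents the groups in the order the terms first appear in the text (a stable sort on the first matching line index); Pre_ excludes inputs where a duplicated search term matches some line, on which A's per-occurrence duplication of each matched line is an accidental duplicate-key artefact (B lists each matching line once).
-- outside the precondition, e.g. on search_in_text('apple', ['ap', 'ap']): A returns {'ap': ['apple', 'apple']}, B returns {'ap': ['apple']}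
import Mathlib
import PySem

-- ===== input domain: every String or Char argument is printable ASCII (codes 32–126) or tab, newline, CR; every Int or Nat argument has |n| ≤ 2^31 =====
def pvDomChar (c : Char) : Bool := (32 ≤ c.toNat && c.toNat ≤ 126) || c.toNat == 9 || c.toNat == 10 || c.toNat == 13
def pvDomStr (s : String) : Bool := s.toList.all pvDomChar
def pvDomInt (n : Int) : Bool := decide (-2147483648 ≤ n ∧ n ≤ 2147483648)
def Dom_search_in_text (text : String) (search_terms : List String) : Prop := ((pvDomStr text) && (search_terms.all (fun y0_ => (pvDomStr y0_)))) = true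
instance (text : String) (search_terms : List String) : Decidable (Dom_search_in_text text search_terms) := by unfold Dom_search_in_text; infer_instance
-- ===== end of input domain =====

-- B is a term-outer re-implementation (collect each term's ms once, then present the groups
-- in the order they first appear in the text) instead of A's line-outer dict-mutating double loop;
-- same asymptotic cost (objective: alternative).

-- ===== PORT A =====
def search_in_text (text : String) (search_terms : List String) : List (String × List String) :=
  -- text.split('\n'): the separator "\n" is non-empty, so split? is always `some`
  let lines := (PySem.Str.split? text "\n").getD []
  (List.foldl (fun (results : PySem.Dict String (List String)) line =>
      List.foldl (fun (results : PySem.Dict String (List String)) term =>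
        if PySem.Str.isIn (PySem.Str.lower term) (PySem.Str.lower line) then
          if results.contains term then
            results.modify term [] (fun v => v ++ [PySem.Str.strip line])
          else
            results.insert term [PySem.Str.strip line]
        else results) results search_terms)
    PySem.Dict.empty lines).items

-- ===== PORT B =====
-- loop body of Source B's `for term in search_terms` loop
def pvStepB (lines : List String) (groups : List (Int × String × List String)) (term : String) : List (Int × String × List String) :=
  let tl := PySem.Str.lower term
  let ms := ((PySem.List.enumerate lines).filter (fun p => PySem.Str.isIn tl (PySem.Str.lower p.2))).map
      (fun p => (p.1, PySem.Str.strip p.2))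
  match ms with
  | [] => groups
  | m :: _ => groups ++ [(m.1, term, ms.map (fun q => q.2))]

def search_in_text_alt (text : String) (search_terms : List String) : List (String × List String) :=
  let lines := (PySem.Str.split? text "\n").getD []
  let groups := List.foldl (pvStepB lines) [] search_terms
  let sortedGroups := PySem.List.sorted groups (fun g => g.1)   -- groups.sort(key=lambda g: g[0]) : stable
  (List.foldl (fun (d : PySem.Dict String (List String)) g => d.insert g.2.1 g.2.2) PySem.Dict.empty sortedGroups).items

-- ===== PRECONDITION & SPEC =====
-- Pre_ excludes inputs on which some DUPLICATED search term matches a line: there A appends that line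
-- once per duplicate occurrence of the term (an accidental duplicate-key artefact); B lists each matching line once.
def Pre_search_in_text (text : String) (search_terms : List String) : Prop :=
  ∀ t ∈ search_terms, search_terms.count t ≤ 1 ∨
    ∀ line ∈ (PySem.Str.split? text "\n").getD [],
      PySem.Str.isIn (PySem.Str.lower t) (PySem.Str.lower line) = false
instance (text : String) (search_terms : List String) : Decidable (Pre_search_in_text text search_terms) := by unfold Pre_search_in_text; infer_instance
def pvWitness_search_in_text : String × List String := ("Alpha beta\ngamma", ["al", "GAM", "zz"])

def Spec_search_in_text (text : String) (search_terms : List String) (out : List (String × List String)) : Prop := out = search_in_text_alt text search_terms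
instance (text : String) (search_terms : List String) (out : List (String × List String)) : Decidable (Spec_search_in_text text search_terms out) := by unfold Spec_search_in_text; infer_instance

-- ===== CLAIM (what is proved, stated in full; the proofs are below) =====
def Claim_equal_search_in_text : Prop := ∀ (text : String) (search_terms : List String), Dom_search_in_text text search_terms → Pre_search_in_text text search_terms → Spec_search_in_text text search_terms (search_in_text text search_terms)

-- ===== LEMMAS AND PROOFS =====

def pvMt (t line : String) : Bool := PySem.Str.isIn (PySem.Str.lower t) (PySem.Str.lower line)

-- terms listed in the order of their first matching line (ties: term order), up to line n
def pvOrder (dterms lines : List String) : Nat → List String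
  | 0 => []
  | n+1 => pvOrder dterms lines n ++ dterms.filter (fun t => lines.findIdx? (pvMt t) == some n)

def pvStepA (terms : List String) (line : String) (d : PySem.Dict String (List String)) : PySem.Dict String (List String) :=
  List.foldl (fun (results : PySem.Dict String (List String)) term =>
    if PySem.Str.isIn (PySem.Str.lower term) (PySem.Str.lower line) then
      if results.contains term then
        results.modify term [] (fun v => v ++ [PySem.Str.strip line])
      else
        results.insert term [PySem.Str.strip line]
    else results) d terms

lemma pvOrder_mem (dterms lines : List String) (n : Nat) (t : String) :
    t ∈ pvOrder dterms lines n ↔ t ∈ dterms ∧ ∃ k, k < n ∧ lines.findIdx? (pvMt t) = some k := by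
  induction n with
  | zero => simp [pvOrder]
  | succ n ih =>
    simp only [pvOrder, List.mem_append, List.mem_filter, ih, beq_iff_eq]
    constructor
    · rintro (⟨ht, k, hk, hfk⟩ | ⟨ht, hfk⟩)
      · exact ⟨ht, k, by omega, hfk⟩
      · exact ⟨ht, n, by omega, hfk⟩
    · rintro ⟨ht, k, hk, hfk⟩
      rcases Nat.lt_succ_iff_lt_or_eq.mp hk with h | h
      · exact Or.inl ⟨ht, k, h, hfk⟩
      · exact Or.inr ⟨ht, h ▸ hfk⟩

lemma pvOrder_nodup (dterms lines : List String) (hts : dterms.Nodup) (n : Nat) :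
    (pvOrder dterms lines n).Nodup := by
  induction n with
  | zero => simp [pvOrder]
  | succ n ih =>
    refine (List.nodup_append).mpr ⟨ih, hts.filter _, ?_⟩
    intro t ht t' ht'
    rintro rfl
    rcases (pvOrder_mem dterms lines n t).mp ht with ⟨-, k, hk, hfk⟩
    rcases List.mem_filter.mp ht' with ⟨-, hbeq⟩
    rw [hfk] at hbeq
    simp only [beq_iff_eq, Option.some.injEq] at hbeq
    omega

lemma pvEnumFilterHead (c : String → Bool) (lines : List String) (s : Int) :
    Option.map (fun r => r.1) ((PySem.List.enumerate lines s).filter (fun p => c p.2)).head?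
      = Option.map (fun k : Nat => s + (k : Int)) (lines.findIdx? c) := by
  induction lines generalizing s with
  | nil => simp [PySem.List.enumerate]
  | cons x xs ih =>
    rw [PySem.List.enumerate_cons, List.findIdx?_cons]
    by_cases hc : c x
    · simp [hc]
    · simp only [List.filter_cons, hc, if_neg, Bool.false_eq_true, not_false_iff, ih (s+1)]
      cases h : xs.findIdx? c with
      | none => simp
      | some k => simp; omega

lemma pvEnumFilterMapSnd (c : String → Bool) (lines : List String) (s : Int) :
    ((PySem.List.enumerate lines s).filter (fun p => c p.2)).map (fun r => r.2) = lines.filter c := by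
  induction lines generalizing s with
  | nil => simp [PySem.List.enumerate]
  | cons x xs ih =>
    rw [PySem.List.enumerate_cons]
    by_cases hc : c x <;> simp [hc, ih (s + 1)]

set_option maxHeartbeats 1000000 in
lemma pvStepA_items (line : String) (ts : List String) (d : PySem.Dict String (List String))
    (hd : d.keys.Nodup) :
    (pvStepA ts line d).items =
      List.map (fun kv => if pvMt kv.1 line = true then (kv.1, kv.2 ++ List.replicate (ts.count kv.1) (PySem.Str.strip line)) else kv) d.items
      ++ List.map (fun t => (t, List.replicate (ts.count t) (PySem.Str.strip line)))
          ((PySem.Set.ofList ts).filter (fun t => pvMt t line && !d.contains t)) := by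
  induction ts generalizing d with
  | nil =>
    show d.items = _
    rw [show PySem.Set.ofList ([] : List String) = [] from rfl]
    simp only [List.count_nil, List.replicate_zero, List.append_nil, List.filter_nil, List.map_nil]
    symm
    calc List.map (fun kv : String × List String => if pvMt kv.1 line = true then (kv.1, kv.2) else kv) d.items
        = List.map id d.items := by
          apply List.map_congr_left
          intro kv _
          split_ifs <;> rfl
      _ = d.items := List.map_id d.items
  | cons t rest ih =>
    by_cases hm : pvMt t line = true
    · by_cases hco : d.contains t = true
      · -- duplicate-or-existing key: modify appends one more copy
        have hstep : pvStepA (t :: rest) line d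
            = pvStepA rest line (d.modify t [] (fun v => v ++ [PySem.Str.strip line])) := by
          unfold pvStepA
          rw [List.foldl_cons, if_pos (show PySem.Str.isIn (PySem.Str.lower t) (PySem.Str.lower line) = true from hm), if_pos hco]
        have hd' : (d.modify t [] (fun v => v ++ [PySem.Str.strip line])).keys.Nodup := by
          rw [PySem.Dict.keys_modify, PySem.Dict.keys_insert_of_contains _ _ hco]
          exact hd
        rw [hstep, ih _ hd']
        have hitems : (d.modify t [] (fun v => v ++ [PySem.Str.strip line])).items
            = List.map (fun kv => if (kv.1 == t) = true then (t, d.getD t [] ++ [PySem.Str.strip line]) else kv) d.items :=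
          PySem.Dict.items_insert_of_contains _ _ hco
        rw [hitems, List.map_map]
        have hmap2 : List.map ((fun kv => if pvMt kv.1 line = true then (kv.1, kv.2 ++ List.replicate (rest.count kv.1) (PySem.Str.strip line)) else kv)
              ∘ fun kv => if (kv.1 == t) = true then (t, d.getD t [] ++ [PySem.Str.strip line]) else kv) d.items
            = List.map (fun kv => if pvMt kv.1 line = true then (kv.1, kv.2 ++ List.replicate ((t :: rest).count kv.1) (PySem.Str.strip line)) else kv) d.items := by
          apply List.map_congr_left
          intro kv hkv
          by_cases hkt : kv.1 = t
          · have hgetD : d.getD t [] = kv.2 := by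
              rw [← hkt]
              exact PySem.Dict.getD_of_mem_items d (k := kv.1) (v := kv.2) (by simpa using hkv) hd []
            simp only [Function.comp, hkt, beq_self_eq_true, if_true]
            rw [if_pos hm, if_pos hm, hgetD, List.count_cons_self, List.append_assoc, List.replicate_succ]
            rfl
          · simp only [Function.comp, beq_iff_eq, hkt, if_false]
            by_cases hc2 : pvMt kv.1 line = true
            · rw [if_pos hc2, if_pos hc2, List.count_cons_of_ne (Ne.symm hkt)]
            · rw [if_neg hc2, if_neg hc2]
        rw [hmap2]
        have hfil : List.filter (fun x => pvMt x line && !(d.modify t [] (fun v => v ++ [PySem.Str.strip line])).contains x) (PySem.Set.ofList rest)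
            = List.filter (fun x => pvMt x line && !d.contains x) ((PySem.Set.ofList rest).discard t) := by
          show _ = List.filter _ (List.filter (fun y => !y == t) (PySem.Set.ofList rest))
          rw [List.filter_filter]
          apply List.filter_congr
          intro x _
          rw [PySem.Dict.contains_modify]
          by_cases hxt : x = t
          · subst hxt
            simp [hco]
          · have : (x == t) = false := beq_eq_false_iff_ne.mpr hxt
            simp [this]
        rw [hfil]
        have hcons : List.filter (fun x => pvMt x line && !d.contains x) (PySem.Set.ofList (t :: rest))
            = List.filter (fun x => pvMt x line && !d.contains x) ((PySem.Set.ofList rest).discard t) := by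
          rw [PySem.Set.ofList_cons, List.filter_cons]
          have : (pvMt t line && !d.contains t) = false := by simp [hm, hco]
          rw [this]
          simp
        rw [hcons]
        congr 1
        apply List.map_congr_left
        intro x hx
        have hxt : x ≠ t := by
          rcases List.mem_filter.mp hx with ⟨hx', -⟩
          exact ((PySem.Set.mem_discard _ _ _).mp hx').2
        rw [List.count_cons_of_ne (Ne.symm hxt)]
      · -- fresh key: insert, later duplicates will append
        have hco' : d.contains t = false := by simpa using hco
        have hstep : pvStepA (t :: rest) line d
            = pvStepA rest line (d.insert t [PySem.Str.strip line]) := by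
          unfold pvStepA
          rw [List.foldl_cons, if_pos (show PySem.Str.isIn (PySem.Str.lower t) (PySem.Str.lower line) = true from hm), if_neg (by simp [hco'])]
        have hd' : (d.insert t [PySem.Str.strip line]).keys.Nodup :=
          PySem.Dict.nodup_keys_insert _ _ _ hd
        rw [hstep, ih _ hd']
        rw [PySem.Dict.items_insert_of_not_contains _ _ hco', List.map_append]
        have htne : ∀ kv ∈ d.items, kv.1 ≠ t := by
          intro kv hkv he
          have hmemk : kv.1 ∈ d.keys := PySem.Dict.mem_keys_of_mem_items d hkv
          have : d.contains t = true := by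
            rw [PySem.Dict.contains_eq_decide_mem_keys]
            exact decide_eq_true (he ▸ hmemk)
          rw [hco'] at this
          exact Bool.false_ne_true this
        have hmapeq : List.map (fun kv => if pvMt kv.1 line = true then (kv.1, kv.2 ++ List.replicate (rest.count kv.1) (PySem.Str.strip line)) else kv) d.items
            = List.map (fun kv => if pvMt kv.1 line = true then (kv.1, kv.2 ++ List.replicate ((t :: rest).count kv.1) (PySem.Str.strip line)) else kv) d.items := by
          apply List.map_congr_left
          intro kv hkv
          by_cases hc2 : pvMt kv.1 line = true
          · rw [if_pos hc2, if_pos hc2, List.count_cons_of_ne (Ne.symm (htne kv hkv))]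
          · rw [if_neg hc2, if_neg hc2]
        rw [hmapeq]
        have hfil : List.filter (fun x => pvMt x line && !(d.insert t [PySem.Str.strip line]).contains x) (PySem.Set.ofList rest)
            = List.filter (fun x => pvMt x line && !d.contains x) ((PySem.Set.ofList rest).discard t) := by
          show _ = List.filter _ (List.filter (fun y => !y == t) (PySem.Set.ofList rest))
          rw [List.filter_filter]
          apply List.filter_congr
          intro x _
          rw [PySem.Dict.contains_insert]
          by_cases hxt : x = t
          · subst hxt
            simp
          · have : (x == t) = false := beq_eq_false_iff_ne.mpr hxt
            simp [this]
        rw [hfil]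
        have hcons : List.filter (fun x => pvMt x line && !d.contains x) (PySem.Set.ofList (t :: rest))
            = t :: List.filter (fun x => pvMt x line && !d.contains x) ((PySem.Set.ofList rest).discard t) := by
          rw [PySem.Set.ofList_cons, List.filter_cons]
          have : (pvMt t line && !d.contains t) = true := by simp [hm, hco']
          rw [this]
          simp
        rw [hcons, List.map_cons]
        have hmap3 : List.map (fun x => (x, List.replicate (rest.count x) (PySem.Str.strip line))) (List.filter (fun x => pvMt x line && !d.contains x) ((PySem.Set.ofList rest).discard t))
            = List.map (fun x => (x, List.replicate ((t :: rest).count x) (PySem.Str.strip line))) (List.filter (fun x => pvMt x line && !d.contains x) ((PySem.Set.ofList rest).discard t)) := by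
          apply List.map_congr_left
          intro x hx
          have hxt : x ≠ t := by
            rcases List.mem_filter.mp hx with ⟨hx', -⟩
            exact ((PySem.Set.mem_discard _ _ _).mp hx').2
          rw [List.count_cons_of_ne (Ne.symm hxt)]
        rw [hmap3]
        rw [show (if pvMt (t, [PySem.Str.strip line]).1 line = true then
              ((t, [PySem.Str.strip line]).1, (t, [PySem.Str.strip line]).2 ++ List.replicate (List.count (t, [PySem.Str.strip line]).1 rest) (PySem.Str.strip line))
            else (t, [PySem.Str.strip line]))
            = (t, List.replicate (List.count t (t :: rest)) (PySem.Str.strip line)) from by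
          rw [if_pos hm, List.count_cons_self, List.replicate_succ]
          rfl]
        rw [List.append_assoc]
        rfl
    · -- this term does not match the line
      have hstep : pvStepA (t :: rest) line d = pvStepA rest line d := by
        unfold pvStepA
        rw [List.foldl_cons, if_neg (show ¬ PySem.Str.isIn (PySem.Str.lower t) (PySem.Str.lower line) = true from hm)]
      rw [hstep, ih _ hd]
      have hmapeq : List.map (fun kv => if pvMt kv.1 line = true then (kv.1, kv.2 ++ List.replicate (rest.count kv.1) (PySem.Str.strip line)) else kv) d.items
          = List.map (fun kv => if pvMt kv.1 line = true then (kv.1, kv.2 ++ List.replicate ((t :: rest).count kv.1) (PySem.Str.strip line)) else kv) d.items := by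
        apply List.map_congr_left
        intro kv _
        by_cases hc2 : pvMt kv.1 line = true
        · have hkt : kv.1 ≠ t := fun he => hm (he ▸ hc2)
          rw [if_pos hc2, if_pos hc2, List.count_cons_of_ne (Ne.symm hkt)]
        · rw [if_neg hc2, if_neg hc2]
      rw [hmapeq]
      have hfil : List.filter (fun x => pvMt x line && !d.contains x) (PySem.Set.ofList (t :: rest))
          = List.filter (fun x => pvMt x line && !d.contains x) (PySem.Set.ofList rest) := by
        rw [PySem.Set.ofList_cons, List.filter_cons]
        have : (pvMt t line && !d.contains t) = false := by
          simp [show pvMt t line = false from Bool.not_eq_true _ ▸ (by simpa using hm)]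
        rw [this]
        simp only [Bool.false_eq_true, if_false]
        show List.filter _ (List.filter (fun y => !y == t) (PySem.Set.ofList rest)) = _
        rw [List.filter_filter]
        apply List.filter_congr
        intro x _
        by_cases hxt : x = t
        · subst hxt
          simp [show pvMt x line = false from Bool.not_eq_true _ ▸ (by simpa using hm)]
        · have : (x == t) = false := beq_eq_false_iff_ne.mpr hxt
          simp [this]
      rw [hfil]
      congr 1
      apply List.map_congr_left
      intro x hx
      have hxm : pvMt x line = true := by
        have h2 := (List.mem_filter.mp hx).2
        simp only [Bool.and_eq_true] at h2
        exact h2.1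
      have hxt : x ≠ t := fun he => hm (he ▸ hxm)
      rw [List.count_cons_of_ne (Ne.symm hxt)]

set_option maxHeartbeats 1000000 in
lemma pvInvA (terms lines : List String) :
    ∀ n, n ≤ lines.length →
      (List.foldl (fun d line => pvStepA terms line d) PySem.Dict.empty (lines.take n)).items
        = (pvOrder (PySem.Set.ofList terms) lines n).map
            (fun t => (t, ((lines.take n).filter (fun l => pvMt t l)).flatMap (fun l => List.replicate (terms.count t) (PySem.Str.strip l)))) := by
  intro n
  induction n with
  | zero =>
    intro _
    show (PySem.Dict.empty : PySem.Dict String (List String)).items = _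
    simp only [pvOrder, List.map_nil]
    rfl
  | succ n ih =>
    intro hn
    have hlt : n < lines.length := hn
    have ihn := ih (by omega)
    have hkeys : (List.foldl (fun d line => pvStepA terms line d) PySem.Dict.empty (lines.take n)).keys
        = pvOrder (PySem.Set.ofList terms) lines n := by
      show ((List.foldl (fun d line => pvStepA terms line d) PySem.Dict.empty (lines.take n)).items).map (fun p => p.1) = _
      rw [ihn, List.map_map]
      exact List.map_id'' (fun t => rfl) _
    have hknd : (List.foldl (fun d line => pvStepA terms line d) PySem.Dict.empty (lines.take n)).keys.Nodup := by
      rw [hkeys]; exact pvOrder_nodup _ lines (PySem.Set.nodup_ofList terms) n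
    rw [List.take_add_one, List.getElem?_eq_getElem hlt]
    simp only [Option.toList_some]
    rw [List.foldl_append, List.foldl_cons, List.foldl_nil]
    show (pvStepA terms lines[n] _).items = _
    rw [pvStepA_items _ _ _ hknd, ihn, List.map_map]
    have hpart1 : List.map ((fun kv => if pvMt kv.1 lines[n] = true then (kv.1, kv.2 ++ List.replicate (terms.count kv.1) (PySem.Str.strip lines[n])) else kv)
          ∘ fun t => (t, ((lines.take n).filter (fun l => pvMt t l)).flatMap (fun l => List.replicate (terms.count t) (PySem.Str.strip l)))) (pvOrder (PySem.Set.ofList terms) lines n)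
        = List.map (fun t => (t, ((lines.take (n+1)).filter (fun l => pvMt t l)).flatMap (fun l => List.replicate (terms.count t) (PySem.Str.strip l)))) (pvOrder (PySem.Set.ofList terms) lines n) := by
      apply List.map_congr_left
      intro t ht
      have htake : (lines.take (n+1)).filter (fun l => pvMt t l)
          = (lines.take n).filter (fun l => pvMt t l) ++ (if pvMt t lines[n] then [lines[n]] else []) := by
        rw [List.take_add_one, List.getElem?_eq_getElem hlt]
        simp only [Option.toList_some, List.filter_append, List.filter_cons, List.filter_nil]
      simp only [Function.comp_apply]
      rw [htake, List.flatMap_append]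
      by_cases hmm : pvMt t lines[n] = true
      · rw [if_pos hmm, if_pos hmm]
        simp
      · rw [if_neg hmm, if_neg hmm]
        simp
    rw [hpart1]
    have hcont : ∀ t, (List.foldl (fun d line => pvStepA terms line d) PySem.Dict.empty (lines.take n)).contains t
        = decide (t ∈ pvOrder (PySem.Set.ofList terms) lines n) := by
      intro t
      rw [PySem.Dict.contains_eq_decide_mem_keys, hkeys]
    have hpart2 : (PySem.Set.ofList terms).filter (fun t => pvMt t lines[n] && !(List.foldl (fun d line => pvStepA terms line d) PySem.Dict.empty (lines.take n)).contains t)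
        = (PySem.Set.ofList terms).filter (fun t => lines.findIdx? (pvMt t) == some n) := by
      apply List.filter_congr
      intro t hterm
      rw [hcont t]
      rcases hf : lines.findIdx? (pvMt t) with _ | k
      · have hnm : pvMt t lines[n] = false := List.findIdx?_eq_none_iff.mp hf _ (List.getElem_mem hlt)
        simp [hnm]
      · rcases List.findIdx?_eq_some_iff_getElem.mp hf with ⟨hklt, hpk, hmin⟩
        by_cases hkn : k = n
        · subst hkn
          have hnotmem : ¬ t ∈ pvOrder (PySem.Set.ofList terms) lines k := by
            intro hmem
            rcases ((pvOrder_mem _ lines k t).mp hmem).2 with ⟨k', hk', hfk'⟩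
            rw [hf] at hfk'
            have : k = k' := by injection hfk'
            omega
          simp [hpk, hnotmem]
        · by_cases hkn' : k < n
          · have hmem : t ∈ pvOrder (PySem.Set.ofList terms) lines n :=
              (pvOrder_mem _ lines n t).mpr ⟨hterm, k, hkn', hf⟩
            simp [hmem, hkn]
          · have hnm : pvMt t lines[n] = false := by
              have := hmin n (by omega)
              simpa using this
            simp [hnm, hkn]
    rw [hpart2]
    have hpart2v : List.map (fun t => (t, List.replicate (terms.count t) (PySem.Str.strip lines[n]))) ((PySem.Set.ofList terms).filter (fun t => lines.findIdx? (pvMt t) == some n))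
        = List.map (fun t => (t, ((lines.take (n+1)).filter (fun l => pvMt t l)).flatMap (fun l => List.replicate (terms.count t) (PySem.Str.strip l)))) ((PySem.Set.ofList terms).filter (fun t => lines.findIdx? (pvMt t) == some n)) := by
      apply List.map_congr_left
      intro t ht
      rcases List.mem_filter.mp ht with ⟨-, hbeq⟩
      have hf : lines.findIdx? (pvMt t) = some n := by simpa using hbeq
      rcases List.findIdx?_eq_some_iff_getElem.mp hf with ⟨hklt, hpk, hmin⟩
      have hearly : (lines.take n).filter (fun l => pvMt t l) = [] := by
        rw [List.filter_eq_nil_iff]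
        intro x hx
        rw [List.mem_take_iff_getElem] at hx
        obtain ⟨i, hi, he⟩ := hx
        have he' : lines[i]'(by omega) = x := by simpa using he
        have hmf : pvMt t (lines[i]'(by omega)) = false := by
          have := hmin i (by omega)
          simpa using this
        rw [← he']
        simp [hmf]
      have hfl : (lines.take (n+1)).filter (fun l => pvMt t l) = [lines[n]] := by
        rw [List.take_add_one, List.getElem?_eq_getElem hlt]
        simp only [Option.toList_some, List.filter_append, hearly, List.filter_cons, List.filter_nil]
        simp [hpk]
      rw [hfl]
      simp
    rw [hpart2v]
    rw [pvOrder, List.map_append, List.take_add_one, List.getElem?_eq_getElem hlt]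
    simp only [Option.toList_some]

-- ----- B-side helpers (proof only) -----

def pvIdx (lines : List String) (t : String) : Int :=
  match lines.findIdx? (pvMt t) with
  | some k => (k : Int)
  | none => 0

def pvHM (lines : List String) (t : String) : Bool := (lines.findIdx? (pvMt t)).isSome

def pvMs (lines : List String) (t : String) : List (Int × String) :=
  ((PySem.List.enumerate lines).filter (fun p => pvMt t p.2)).map (fun p => (p.1, PySem.Str.strip p.2))

def pvF (lines : List String) (t : String) : Int × String × List String :=
  (pvIdx lines t, t, (pvMs lines t).map (fun q => q.2))

lemma pvStepB_eq (lines : List String) (acc : List (Int × String × List String)) (t : String) :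
    pvStepB lines acc t = if pvHM lines t then acc ++ [pvF lines t] else acc := by
  show (match pvMs lines t with
        | [] => acc
        | m :: _ => acc ++ [(m.1, t, (pvMs lines t).map (fun q : Int × String => q.2))]) = _
  have hh := pvEnumFilterHead (fun l => pvMt t l) lines 0
  cases hF : (PySem.List.enumerate lines).filter (fun p => pvMt t p.2) with
  | nil =>
    rw [hF] at hh
    simp only [List.head?_nil, Option.map_none] at hh
    have hf : lines.findIdx? (pvMt t) = none := by
      cases h : lines.findIdx? (pvMt t) with
      | none => rfl
      | some k => rw [h] at hh; simp at hh
    have : pvHM lines t = false := by simp [pvHM, hf]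
    rw [this]
    simp only [Bool.false_eq_true, if_false]
    rw [show pvMs lines t = [] from by simp [pvMs, hF]]
  | cons r rest =>
    rw [hF] at hh
    simp only [List.head?_cons, Option.map_some] at hh
    cases hf : lines.findIdx? (pvMt t) with
    | none => rw [hf] at hh; simp at hh
    | some k =>
      rw [hf] at hh
      simp only [Option.map_some, Option.some.injEq] at hh
      have hr1 : r.1 = (k : Int) := by omega
      have hhm : pvHM lines t = true := by simp [pvHM, hf]
      rw [hhm, if_pos rfl]
      rw [show pvMs lines t = (r.1, PySem.Str.strip r.2) :: rest.map (fun p => (p.1, PySem.Str.strip p.2)) from by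
        simp [pvMs, hF]]
      have hidx : pvIdx lines t = (k : Int) := by simp [pvIdx, hf]
      simp only [pvF, hidx, hr1]
      rw [show pvMs lines t = (r.1, PySem.Str.strip r.2) :: rest.map (fun p => (p.1, PySem.Str.strip p.2)) from by
        simp [pvMs, hF], hr1]

lemma pvGroups (lines terms : List String) (acc : List (Int × String × List String)) :
    List.foldl (pvStepB lines) acc terms = acc ++ (terms.filter (pvHM lines)).map (pvF lines) := by
  have h1 : List.foldl (pvStepB lines) acc terms
      = List.foldl (fun acc t => if pvHM lines t then acc ++ [pvF lines t] else acc) acc terms :=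
    PySem.List.foldl_congr_mem _ _ _ _ (fun acc t _ => pvStepB_eq lines acc t)
  rw [h1, PySem.List.foldl_append_if]

-- stable sort by first-line index = concatenation of the per-line buckets
def pvBuckets (gs : List (Int × String × List String)) : Nat → List (Int × String × List String)
  | 0 => []
  | n+1 => pvBuckets gs n ++ gs.filter (fun g => g.1 == ((n : Nat) : Int))

lemma pvBuckets_nil (n : Nat) : pvBuckets [] n = [] := by
  induction n with
  | zero => rfl
  | succ n ih => simp [pvBuckets, ih]

lemma pvBuckets_key (gs : List (Int × String × List String)) (n : Nat) :
    ∀ y ∈ pvBuckets gs n, ∃ m : Nat, m < n ∧ y.1 = (m : Int) := by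
  induction n with
  | zero => simp [pvBuckets]
  | succ n ih =>
    intro y hy
    rcases List.mem_append.mp hy with h | h
    · rcases ih y h with ⟨m, hm, he⟩
      exact ⟨m, by omega, he⟩
    · rcases List.mem_filter.mp h with ⟨-, hbeq⟩
      exact ⟨n, by omega, by simpa using hbeq⟩

lemma pvBuckets_append (gs : List (Int × String × List String)) (g : Int × String × List String)
    (k : Nat) (hk : g.1 = (k : Int)) :
    ∀ n, n ≤ k + 1 → pvBuckets (gs ++ [g]) n = pvBuckets gs n ++ (if n = k + 1 then [g] else []) := by
  intro n
  induction n with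
  | zero =>
    intro _
    simp [pvBuckets]
  | succ n ih =>
    intro hn
    have hnk : n ≤ k := by omega
    have ihn := ih (by omega)
    rw [if_neg (by omega)] at ihn
    simp only [List.append_nil] at ihn
    show pvBuckets (gs ++ [g]) n ++ (gs ++ [g]).filter (fun g => g.1 == ((n : Nat) : Int)) = _
    rw [ihn, List.filter_append]
    by_cases hkn : n = k
    · subst hkn
      rw [if_pos rfl]
      rw [show List.filter (fun g => g.1 == ((n : Nat) : Int)) [g] = [g] from by simp [hk]]
      show pvBuckets gs n ++ (gs.filter _ ++ [g]) = (pvBuckets gs n ++ gs.filter _) ++ [g]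
      rw [List.append_assoc]
    · rw [if_neg (by omega)]
      rw [show List.filter (fun g => g.1 == ((n : Nat) : Int)) [g] = [] from by
        simp [hk]; omega]
      simp [pvBuckets]

lemma pvInsertBy_append_right {α : Type} (before : α → α → Bool) (g : α) (L M : List α)
    (h : ∀ y ∈ M, before g y = true) :
    PySem.List.insertBy before g (L ++ M) = PySem.List.insertBy before g L ++ M := by
  induction L with
  | nil =>
    cases M with
    | nil => rfl
    | cons y t =>
      simp only [List.nil_append]
      show PySem.List.insertBy before g (y :: t) = [g] ++ (y :: t)
      simp [PySem.List.insertBy, h y (by simp)]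
  | cons x L ih =>
    simp only [List.cons_append]
    show PySem.List.insertBy before g (x :: (L ++ M)) = PySem.List.insertBy before g (x :: L) ++ M
    by_cases hb : before g x = true
    · simp [PySem.List.insertBy, hb]
    · simp only [PySem.List.insertBy, Bool.not_eq_true] at *
      rw [hb]
      simp only [Bool.false_eq_true, if_false, List.cons_append]
      rw [ih]

lemma pvInsert (g : Int × String × List String) (k : Nat) (hk : g.1 = (k : Int)) :
    ∀ N, k < N → ∀ gs, PySem.List.insertBy (fun a b => decide (a.1 < b.1)) g (pvBuckets gs N)
      = pvBuckets (gs ++ [g]) N := by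
  intro N
  induction N with
  | zero => intro h; omega
  | succ N ih =>
    intro hN gs
    by_cases hkN : k = N
    · subst hkN
      have hnb : ∀ y ∈ pvBuckets gs (k+1), (fun a b : Int × String × List String => decide (a.1 < b.1)) g y = false := by
        intro y hy
        rcases pvBuckets_key gs (k+1) y hy with ⟨m, hm, he⟩
        simp only [he, hk, decide_eq_false_iff_not]
        exact_mod_cast by omega
      rw [PySem.List.insertBy_of_forall_not_before _ _ _ hnb]
      rw [pvBuckets_append gs g k hk (k+1) le_rfl, if_pos rfl]
    · have hkN' : k < N := by omega
      show PySem.List.insertBy _ g (pvBuckets gs N ++ gs.filter (fun g => g.1 == ((N : Nat) : Int))) = _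
      rw [pvInsertBy_append_right _ _ _ _ (by
        intro y hy
        rcases List.mem_filter.mp hy with ⟨-, hbeq⟩
        have hy1 : y.1 = (N : Int) := by simpa using hbeq
        simp only [hy1, hk, decide_eq_true_eq]
        exact_mod_cast hkN')]
      rw [ih hkN' gs]
      show pvBuckets (gs ++ [g]) N ++ _ = pvBuckets (gs ++ [g]) N ++ (gs ++ [g]).filter (fun g => g.1 == ((N : Nat) : Int))
      rw [List.filter_append]
      rw [show List.filter (fun g => g.1 == ((N : Nat) : Int)) [g] = [] from by
        simp [hk]; omega]
      simp

lemma pvSortedBuckets (N : Nat) :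
    ∀ gs : List (Int × String × List String), (∀ g ∈ gs, ∃ k : Nat, k < N ∧ g.1 = (k : Int)) →
      PySem.List.sorted gs (fun g => g.1) = pvBuckets gs N := by
  intro gs
  induction gs using List.reverseRecOn with
  | nil => intro _; rw [pvBuckets_nil]; rfl
  | append_singleton gs g ih =>
    intro h
    rcases h g (by simp) with ⟨k, hkN, hk⟩
    rw [PySem.List.sorted_eq_foldl_insertBy, List.foldl_append, List.foldl_cons, List.foldl_nil,
      ← PySem.List.sorted_eq_foldl_insertBy]
    rw [ih (fun x hx => h x (by simp [hx]))]
    exact pvInsert g k hk N hkN gs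

lemma pvBuckets_order (terms lines : List String) :
    ∀ n, pvBuckets ((terms.filter (pvHM lines)).map (pvF lines)) n
      = (pvOrder terms lines n).map (pvF lines) := by
  intro n
  induction n with
  | zero => rfl
  | succ n ih =>
    show pvBuckets _ n ++ _ = (pvOrder terms lines n ++ _).map (pvF lines)
    rw [List.map_append, ih]
    congr 1
    rw [List.filter_map, List.filter_filter]
    congr 1
    apply List.filter_congr
    intro t _
    simp only [Function.comp_apply]
    cases hf : lines.findIdx? (pvMt t) with
    | none => simp [pvHM, hf]
    | some m =>
      have hhm : pvHM lines t = true := by simp [pvHM, hf]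
      have hidx : (pvF lines t).1 = (m : Int) := by simp [pvF, pvIdx, hf]
      rw [hidx, hhm]
      simp only [Bool.and_true]
      by_cases hmn : m = n
      · subst hmn; simp
      · have h1 : (((m : Nat) : Int) == ((n : Nat) : Int)) = false := by
          simp; omega
        have h2 : (some m == some n) = false := by
          simp [hmn]
        rw [h1, h2]

lemma pvFilterSet (p : String → Bool) :
    ∀ xs : List String, (∀ x ∈ xs, 1 < xs.count x → p x = false) →
      (PySem.Set.ofList xs).filter p = xs.filter p := by
  intro xs
  induction xs with
  | nil => intro _; rfl
  | cons x xs ih =>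
    intro h
    have hrec : ∀ y ∈ xs, 1 < xs.count y → p y = false := by
      intro y hy hc
      exact h y (by simp [hy]) (by rw [List.count_cons]; omega)
    rw [PySem.Set.ofList_cons]
    show List.filter p (x :: List.filter (fun y => !y == x) (PySem.Set.ofList xs)) = _
    rw [List.filter_cons, List.filter_cons, List.filter_filter]
    by_cases hp : p x = true
    · have hx : x ∉ xs := by
        by_contra hmem
        have : 1 < (x :: xs).count x := by
          rw [List.count_cons_self]
          have := List.count_pos_iff.mpr hmem
          omega
        rw [h x (by simp) this] at hp
        exact Bool.false_ne_true hp
      have hfx : List.filter (fun a => p a && !a == x) (PySem.Set.ofList xs)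
          = List.filter p (PySem.Set.ofList xs) := by
        apply List.filter_congr
        intro y hy
        have hyx : y ≠ x := fun he => hx (he ▸ ((PySem.Set.mem_ofList xs y).mp hy))
        have : (y == x) = false := beq_eq_false_iff_ne.mpr hyx
        simp [this]
      rw [hp, hfx, ih hrec]
    · have hp' : p x = false := by simpa using hp
      have hfx : List.filter (fun a => p a && !a == x) (PySem.Set.ofList xs)
          = List.filter p (PySem.Set.ofList xs) := by
        apply List.filter_congr
        intro y hy
        by_cases hyx : y = x
        · subst hyx
          simp [hp']
        · have : (y == x) = false := beq_eq_false_iff_ne.mpr hyx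
          simp [this]
      rw [hp', hfx, ih hrec]

lemma pvOrder_set (terms lines : List String)
    (hdup : ∀ t ∈ terms, 1 < terms.count t → lines.findIdx? (pvMt t) = none) :
    ∀ n, pvOrder (PySem.Set.ofList terms) lines n = pvOrder terms lines n := by
  intro n
  induction n with
  | zero => rfl
  | succ n ih =>
    show pvOrder _ lines n ++ _ = pvOrder _ lines n ++ _
    rw [ih]
    congr 1
    apply pvFilterSet
    intro t ht hc
    rw [hdup t ht hc]
    rfl

lemma pvDictItems (v : String → List String) :
    ∀ ts : List String, ts.Nodup →
      (List.foldl (fun (d : PySem.Dict String (List String)) t => d.insert t (v t)) PySem.Dict.empty ts).items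
        = ts.map (fun t => (t, v t)) := by
  intro ts
  induction ts using List.reverseRecOn with
  | nil => intro _; rfl
  | append_singleton ts t ih =>
    intro h
    have h1 : ts.Nodup := (List.nodup_append.mp h).1
    have hdisj := List.disjoint_of_nodup_append h
    have iht := ih h1
    rw [List.foldl_append, List.foldl_cons, List.foldl_nil]
    have hkeys : (List.foldl (fun (d : PySem.Dict String (List String)) t => d.insert t (v t)) PySem.Dict.empty ts).keys = ts := by
      show ((List.foldl (fun (d : PySem.Dict String (List String)) t => d.insert t (v t)) PySem.Dict.empty ts).items).map (fun p => p.1) = _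
      rw [iht, List.map_map]
      exact List.map_id'' (fun t => rfl) _
    have hco : (List.foldl (fun (d : PySem.Dict String (List String)) t => d.insert t (v t)) PySem.Dict.empty ts).contains t = false := by
      rw [PySem.Dict.contains_eq_decide_mem_keys, hkeys]
      exact decide_eq_false (fun hmem => hdisj hmem (List.mem_singleton_self t))
    rw [PySem.Dict.items_insert_of_not_contains _ _ hco, iht, List.map_append]
    rfl

lemma pvMain (terms lines : List String)
    (hdup : ∀ t ∈ terms, 1 < terms.count t → lines.findIdx? (pvMt t) = none) :
    (List.foldl (fun d line => pvStepA terms line d) PySem.Dict.empty lines).items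
      = (List.foldl (fun (d : PySem.Dict String (List String)) g => d.insert g.2.1 g.2.2) PySem.Dict.empty
          (PySem.List.sorted (List.foldl (pvStepB lines) [] terms) (fun g => g.1))).items := by
  -- A side
  have hA := pvInvA terms lines lines.length le_rfl
  rw [List.take_length, pvOrder_set terms lines hdup] at hA
  have hA' : (List.foldl (fun d line => pvStepA terms line d) PySem.Dict.empty lines).items
      = (pvOrder terms lines lines.length).map (fun t => (t, ((lines.filter (fun l => pvMt t l)).map PySem.Str.strip))) := by
    rw [hA]
    apply List.map_congr_left
    intro t ht
    rcases (pvOrder_mem terms lines lines.length t).mp ht with ⟨htm, k, -, hfk⟩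
    have hc1 : terms.count t = 1 := by
      have hpos := List.count_pos_iff.mpr htm
      by_contra hne
      have hgt : 1 < terms.count t := by omega
      rw [hdup t htm hgt] at hfk
      exact Option.some_ne_none k hfk.symm
    rw [hc1]
    have hfm : ∀ l : List String, (l.flatMap fun x => List.replicate 1 (PySem.Str.strip x)) = l.map PySem.Str.strip := by
      intro l
      induction l with
      | nil => rfl
      | cons x xs ihx => rw [List.flatMap_cons, ihx]; rfl
    rw [hfm]
  -- B side
  have hG : List.foldl (pvStepB lines) [] terms = (terms.filter (pvHM lines)).map (pvF lines) := by
    rw [pvGroups]; rfl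
  have hS : PySem.List.sorted (List.foldl (pvStepB lines) [] terms) (fun g => g.1)
      = (pvOrder terms lines lines.length).map (pvF lines) := by
    rw [hG, pvSortedBuckets lines.length _ ?_, pvBuckets_order]
    intro g hg
    rcases List.mem_map.mp hg with ⟨t, htf, rfl⟩
    rcases List.mem_filter.mp htf with ⟨-, hhm⟩
    rcases Option.isSome_iff_exists.mp hhm with ⟨k, hf⟩
    refine ⟨k, ?_, by simp [pvF, pvIdx, hf]⟩
    rcases List.findIdx?_eq_some_iff_getElem.mp hf with ⟨hklt, -, -⟩
    exact hklt
  rw [hS, List.foldl_map]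
  have hB : (List.foldl (fun (d : PySem.Dict String (List String)) t => d.insert (pvF lines t).2.1 (pvF lines t).2.2) PySem.Dict.empty (pvOrder terms lines lines.length)).items
      = (pvOrder terms lines lines.length).map (fun t => (t, (pvMs lines t).map (fun q => q.2))) := by
    have := pvDictItems (fun t => (pvMs lines t).map (fun q => q.2)) (pvOrder terms lines lines.length)
      (by rw [← pvOrder_set terms lines hdup]
          exact pvOrder_nodup _ lines (PySem.Set.nodup_ofList terms) lines.length)
    exact this
  rw [hB, hA']
  apply List.map_congr_left
  intro t _
  have : (pvMs lines t).map (fun q => q.2) = (lines.filter (fun l => pvMt t l)).map PySem.Str.strip := by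
    rw [pvMs, List.map_map]
    have := pvEnumFilterMapSnd (fun l => pvMt t l) lines 0
    rw [show ((fun q : Int × String => q.2) ∘ fun p : Int × String => (p.1, PySem.Str.strip p.2)) = (fun p : Int × String => PySem.Str.strip p.2) from rfl]
    rw [show (fun p : Int × String => PySem.Str.strip p.2) = (PySem.Str.strip ∘ fun p : Int × String => p.2) from rfl]
    rw [← List.map_map, this]
  rw [this]

-- ===== VERDICT (by name: the statement is the Claim_ definition above) =====
theorem search_in_text_spec : Claim_equal_search_in_text := by
  intro text terms _hdom hpre
  unfold Spec_search_in_text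
  show search_in_text text terms = search_in_text_alt text terms
  unfold search_in_text search_in_text_alt
  refine pvMain terms ((PySem.Str.split? text "\n").getD []) ?_
  intro t ht hgt
  rcases hpre t ht with hle | hnone
  · omega
  · exact List.findIdx?_eq_none_iff.mpr (fun line hline => hnone line hline)
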